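-- pv_equiv track=rewrite | github.com/qr-bao/predatorandpreygameEnv1 | tools/narry_precess.py | process_matrix
-- ===== SOURCE A (Python) =====
-- def process_matrix(matrix, target_shape=(5, 3)):
--     """
--     裁剪或填充矩阵，使其保持 target_shape 的大小。
--
--     参数:
--     - matrix: 输入的矩阵，形状为 (N, 3)
--     - target_shape: 目标形状，默认为 (5, 3)
--
--     返回:
--     - 处理后的矩阵，形状为 target_shape
--     """
--     if not matrix:
--         # 如果矩阵为空，直接填充目标大小的零矩阵
--         return [[0] * target_shape[1] for _ in range(target_shape[0])]
--     current_rows = len(matrix)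
--     current_cols = len(matrix[0]) if current_rows > 0 else 0
--
--     # 确保输入矩阵的列数正确
--     assert current_cols == target_shape[1], f"输入矩阵的列数应为 {target_shape[1]}，但得到了 {current_cols}"
--
--     # 如果当前矩阵行数大于目标行数，则进行裁剪
--     if current_rows > target_shape[0]:
--         processed_matrix = matrix[:target_shape[0]]
--     # 如果当前矩阵行数小于目标行数，则进行填充
--     elif current_rows < target_shape[0]:
--         processed_matrix = matrix[:]
--         padding_rows = target_shape[0] - current_rows
--         padding = [[0] * target_shape[1]] * padding_rows
--         processed_matrix.extend(padding)
--     else: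
--         processed_matrix = matrix
--
--     return processed_matrix
-- ===== SOURCE B (Python) =====
-- def process_matrix(matrix, target_shape=(5, 3)):
--     if matrix:
--         assert len(matrix[0]) == target_shape[1], f"columns should be {target_shape[1]}, got {len(matrix[0])}"
--     rows, cols = target_shape
--     return [matrix[i] if i < len(matrix) else [0] * cols for i in range(rows)]
-- ===== Notes on version B (the rewrite author's own statement) =====
-- stated objective: simpler
-- what changed: Replace A's three-way crop/pad/equal branching (slice, copy, extend with a repeated padding block) by a single comprehension over range(target rows) that selects an existing row or a zero row per index.
-- intended difference: On non-empty matrices with a negative target row count that is smaller in magnitude than the matrix (matrix non-empty, target_shape[0] < 0, len(matrix)+target_shape[0] > 0) A's slice matrix[:target_shape[0]] wraps around and returns a non-empty prefix of the matrix, while B returns a matrix with zero rows, which is the intended result for a target of non-positively many rows. — e.g. on process_matrix([[1], [2]], (-1, 1)): A returns [[1]], B returns []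
import Mathlib
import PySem

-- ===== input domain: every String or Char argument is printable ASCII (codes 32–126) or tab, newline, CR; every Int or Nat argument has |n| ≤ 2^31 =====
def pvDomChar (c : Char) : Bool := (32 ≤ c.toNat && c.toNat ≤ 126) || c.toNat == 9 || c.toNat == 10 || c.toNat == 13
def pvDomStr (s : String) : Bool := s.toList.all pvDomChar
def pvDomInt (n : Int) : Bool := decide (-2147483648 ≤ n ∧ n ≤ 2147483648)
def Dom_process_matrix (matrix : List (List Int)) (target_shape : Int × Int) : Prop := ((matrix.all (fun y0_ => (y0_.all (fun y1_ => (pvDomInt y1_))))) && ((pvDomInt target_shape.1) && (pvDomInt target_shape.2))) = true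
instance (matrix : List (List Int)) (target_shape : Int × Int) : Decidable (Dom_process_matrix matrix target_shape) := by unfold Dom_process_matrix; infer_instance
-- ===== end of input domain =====

-- B replaces A's crop/pad/equal three-way branch by one per-index row-select comprehension (simpler); values agree except on the D_ corner stated below.

-- ===== PORT A =====
def process_matrix (matrix : List (List Int)) (target_shape : Int × Int) : List (List Int) :=
  if matrix = [] then
    -- return [[0] * target_shape[1] for _ in range(target_shape[0])]
    (PySem.List.pyRange 0 target_shape.1 1).map (fun _ => PySem.List.pyRepeat [(0 : Int)] target_shape.2)
  else
    -- assert current_cols == target_shape[1]  (failure excluded by Pre_process_matrix); current_rows = len(matrix)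
    if (matrix.length : Int) > target_shape.1 then
      PySem.List.slice matrix none (some target_shape.1)          -- matrix[:target_shape[0]]
    else if (matrix.length : Int) < target_shape.1 then
      matrix ++ PySem.List.pyRepeat [PySem.List.pyRepeat [(0 : Int)] target_shape.2] (target_shape.1 - (matrix.length : Int))
    else
      matrix

-- ===== PORT B =====
def process_matrix_alt (matrix : List (List Int)) (target_shape : Int × Int) : List (List Int) :=
  -- assert as in A (failure excluded by Pre_process_matrix)
  (PySem.List.pyRange 0 target_shape.1 1).map (fun i =>
    if i < (matrix.length : Int) then (PySem.List.pyGet? matrix i).getD []   -- matrix[i], always in range here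
    else PySem.List.pyRepeat [(0 : Int)] target_shape.2)

-- ===== PRECONDITION & SPEC =====
-- Pre_ excludes exactly the inputs where both Pythons raise AssertionError: a non-empty matrix whose first row's length differs from target_shape[1].
def Pre_process_matrix (matrix : List (List Int)) (target_shape : Int × Int) : Prop :=
  matrix = [] ∨ ((matrix.headD []).length : Int) = target_shape.2

instance (matrix : List (List Int)) (target_shape : Int × Int) : Decidable (Pre_process_matrix matrix target_shape) := by unfold Pre_process_matrix; infer_instance

def pvWitness_process_matrix : List (List Int) × (Int × Int) := ([[1, 2, 3]], (5, 3))

-- On non-empty matrices with target_shape.1 < 0 and matrix.length + target_shape.1 > 0, A's slice matrix[:target_shape[0]] wraps around and returns a non-empty prefix, while B returns a matrix with zero rows, the intended result for a non-positive target row count.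
def D_process_matrix (matrix : List (List Int)) (target_shape : Int × Int) : Prop :=
  matrix ≠ [] ∧ target_shape.1 < 0 ∧ 0 < (matrix.length : Int) + target_shape.1

instance (matrix : List (List Int)) (target_shape : Int × Int) : Decidable (D_process_matrix matrix target_shape) := by unfold D_process_matrix; infer_instance

def Spec_process_matrix (matrix : List (List Int)) (target_shape : Int × Int) (out : List (List Int)) : Prop := ¬ D_process_matrix matrix target_shape → out = process_matrix_alt matrix target_shape
instance (matrix : List (List Int)) (target_shape : Int × Int) (out : List (List Int)) : Decidable (Spec_process_matrix matrix target_shape out) := by unfold Spec_process_matrix; infer_instance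

def pvDiffWitness_process_matrix : List (List Int) × (Int × Int) := ([[1], [2]], (-1, 1))
def pvDiffWitnessOut_process_matrix : (List (List Int)) × (List (List Int)) := ([[1]], [])

-- ===== CLAIM (what is proved, stated in full; the proofs are below) =====
def Claim_unchanged_process_matrix : Prop := ∀ (matrix : List (List Int)) (target_shape : Int × Int), Dom_process_matrix matrix target_shape → Pre_process_matrix matrix target_shape → Spec_process_matrix matrix target_shape (process_matrix matrix target_shape)
def Claim_changed_process_matrix : Prop := Dom_process_matrix (pvDiffWitness_process_matrix.1) (pvDiffWitness_process_matrix.2) ∧ Pre_process_matrix (pvDiffWitness_process_matrix.1) (pvDiffWitness_process_matrix.2) ∧ D_process_matrix (pvDiffWitness_process_matrix.1) (pvDiffWitness_process_matrix.2) ∧ process_matrix (pvDiffWitness_process_matrix.1) (pvDiffWitness_process_matrix.2) = pvDiffWitnessOut_process_matrix.1 ∧ process_matrix_alt (pvDiffWitness_process_matrix.1) (pvDiffWitness_process_matrix.2) = pvDiffWitnessOut_process_matrix.2 ∧ pvDiffWitnessOut_process_matrix.1 ≠ pvDiffWitnessOut_process_matrix.2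
def Claim_exact_process_matrix : Prop := ∀ (matrix : List (List Int)) (target_shape : Int × Int), Dom_process_matrix matrix target_shape → Pre_process_matrix matrix target_shape → D_process_matrix matrix target_shape → process_matrix matrix target_shape ≠ process_matrix_alt matrix target_shape

-- ===== LEMMAS AND PROOFS (the verdict theorems process_matrix_spec / process_matrix_changed / process_matrix_tight are at the bottom) =====

-- B's comprehension over range(m) equals "take m, then pad with zero rows".
theorem alt_map_range_eq (xs : List (List Int)) (z : List Int) (m : Nat) :
    (List.range m).map (fun k : Nat => if (k : Int) < (xs.length : Int) then (PySem.List.pyGet? xs (k : Int)).getD [] else z)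
      = xs.take m ++ List.replicate (m - xs.length) z := by
  induction xs generalizing m with
  | nil =>
    have hc : (List.range m).map (fun k : Nat => if (k : Int) < (([] : List (List Int)).length : Int) then (PySem.List.pyGet? ([] : List (List Int)) (k : Int)).getD [] else z)
        = (List.range m).map (fun _ => z) := List.map_congr_left (by intro k _; simp)
    rw [hc]
    simp [List.map_const']
  | cons a xs ih =>
    cases m with
    | zero => simp
    | succ m' =>
      rw [List.range_succ_eq_map]
      simp only [List.map_cons, List.map_map]
      have h0 : ((0 : Nat) : Int) < ((a :: xs).length : Int) := by simp
      rw [if_pos h0]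
      have hhead : (PySem.List.pyGet? (a :: xs) ((0 : Nat) : Int)).getD [] = a := by
        simp [PySem.List.pyGet?, PySem.List.pyIdx?]
      rw [hhead]
      have hfun : ((fun k : Nat => if (k : Int) < ((a :: xs).length : Int) then (PySem.List.pyGet? (a :: xs) (k : Int)).getD [] else z) ∘ Nat.succ)
          = (fun k : Nat => if (k : Int) < (xs.length : Int) then (PySem.List.pyGet? xs (k : Int)).getD [] else z) := by
        funext k
        simp only [Function.comp]
        have hcond : (((Nat.succ k : Nat) : Int) < ((a :: xs).length : Int)) ↔ ((k : Int) < (xs.length : Int)) := by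
          simp only [List.length_cons]; push_cast; omega
        by_cases hk : (k : Int) < (xs.length : Int)
        · rw [if_pos (hcond.mpr hk), if_pos hk]
          have hg : PySem.List.pyGet? (a :: xs) ((Nat.succ k : Nat) : Int) = PySem.List.pyGet? xs (k : Int) := by
            rw [PySem.List.pyGet?_natCast, PySem.List.pyGet?_natCast]
            simp [Nat.succ_eq_add_one]
          rw [hg]
        · rw [if_neg (fun hx => hk (hcond.mp hx)), if_neg hk]
      rw [hfun, ih m']
      simp [Nat.succ_sub_succ]

-- B's port rewritten through alt_map_range_eq for a nonnegative row target.
theorem alt_eq_take_pad (xs : List (List Int)) (ts : Int × Int) (_ht : 0 ≤ ts.1) :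
    process_matrix_alt xs ts = xs.take ts.1.toNat ++ List.replicate (ts.1.toNat - xs.length) (PySem.List.pyRepeat [(0 : Int)] ts.2) := by
  unfold process_matrix_alt
  rw [PySem.List.pyRange_one]
  simp only [zero_add, Int.sub_zero, List.map_map]
  have : ((fun i => if i < (xs.length : Int) then (PySem.List.pyGet? xs i).getD [] else PySem.List.pyRepeat [(0 : Int)] ts.2) ∘ (fun k : Nat => (k : Int)))
      = (fun k : Nat => if ((k : Int) : Int) < (xs.length : Int) then (PySem.List.pyGet? xs ((k : Nat) : Int)).getD [] else PySem.List.pyRepeat [(0 : Int)] ts.2) := by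
    funext k; simp [Function.comp]
  rw [this, alt_map_range_eq]

theorem process_matrix_spec : Claim_unchanged_process_matrix := by
  intro matrix ts _hdom _hpre hD
  unfold process_matrix
  by_cases hm : matrix = []
  · subst hm
    rw [if_pos rfl]
    unfold process_matrix_alt
    apply List.map_congr_left
    intro i hi
    have h0 : (0 : Int) ≤ i := ((PySem.List.mem_pyRange_one).mp hi).1
    rw [if_neg (by simp; omega)]
  · rw [if_neg hm]
    have hlen : 1 ≤ matrix.length := by
      cases matrix with
      | nil => exact absurd rfl hm
      | cons a t => simp
    unfold D_process_matrix at hD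
    rw [not_and_or, not_and_or] at hD
    by_cases ht : 0 ≤ ts.1
    · rw [alt_eq_take_pad matrix ts ht]
      by_cases hgt : (matrix.length : Int) > ts.1
      · rw [if_pos (by exact_mod_cast hgt)]
        rw [PySem.List.slice_to matrix ht]
        have : ts.1.toNat - matrix.length = 0 := by omega
        rw [this]
        simp
      · rw [if_neg (by exact_mod_cast hgt)]
        by_cases hlt : (matrix.length : Int) < ts.1
        · rw [if_pos (by exact_mod_cast hlt)]
          rw [PySem.List.pyRepeat_singleton]
          have htake : matrix.take ts.1.toNat = matrix := List.take_of_length_le (by omega)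
          rw [htake]
          congr 1
          congr 1
          omega
        · rw [if_neg (by exact_mod_cast hlt)]
          have heq : (matrix.length : Int) = ts.1 := by omega
          have htake : matrix.take ts.1.toNat = matrix := List.take_of_length_le (by omega)
          rw [htake]
          have : ts.1.toNat - matrix.length = 0 := by omega
          rw [this]
          simp
    · -- ts.1 < 0 and (outside D_) matrix.length + ts.1 ≤ 0: both sides are []
      have ht' : ts.1 < 0 := by omega
      have hle : (matrix.length : Int) + ts.1 ≤ 0 := by
        rcases hD with h | h | h
        · exact absurd hm h
        · omega
        · omega
      rw [if_pos (by exact_mod_cast (by omega : (matrix.length : Int) > ts.1))]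
      have hB : process_matrix_alt matrix ts = [] := by
        unfold process_matrix_alt
        rw [PySem.List.pyRange_one_eq_nil (by omega)]
        simp
      rw [hB]
      obtain ⟨k, hk, hts⟩ : ∃ k : Nat, 0 < k ∧ ts.1 = -(k : Int) :=
        ⟨(-ts.1).toNat, by omega, by omega⟩
      rw [hts, PySem.List.slice_to_neg_natCast matrix k hk]
      have : matrix.length - k = 0 := by omega
      rw [this]
      simp

theorem process_matrix_tight : Claim_exact_process_matrix := by
  intro matrix ts _hdom _hpre hD
  obtain ⟨hm, ht, hlen⟩ := hD
  have hB : process_matrix_alt matrix ts = [] := by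
    unfold process_matrix_alt
    rw [PySem.List.pyRange_one_eq_nil (by omega)]
    simp
  have hA : process_matrix matrix ts ≠ [] := by
    unfold process_matrix
    rw [if_neg hm]
    have hlen1 : 1 ≤ matrix.length := by
      cases matrix with
      | nil => exact absurd rfl hm
      | cons a t => simp
    rw [if_pos (by exact_mod_cast (by omega : (matrix.length : Int) > ts.1))]
    obtain ⟨k, hk, hts⟩ : ∃ k : Nat, 0 < k ∧ ts.1 = -(k : Int) :=
      ⟨(-ts.1).toNat, by omega, by omega⟩
    rw [hts, PySem.List.slice_to_neg_natCast matrix k hk]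
    intro hcontra
    have := congrArg List.length hcontra
    simp at this
    omega
  rw [hB]
  exact hA

theorem process_matrix_changed : Claim_changed_process_matrix := by unfold Claim_changed_process_matrix; decide
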